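-- pv_equiv track=rewrite | github.com/zwuqiongk/UAV-visual-navigation | binding.py | _find_continuous_binding_segments
-- ===== SOURCE A (Python) =====
-- def _find_continuous_binding_segments(frames, copter_id, max_gap):
--     """
--     在帧序列中查找连续的绑定段
--     返回: 列表的列表，每个子列表是一个连续绑定段
--     """
--     if not frames:
--         return []
--
--     segments = []
--     current_segment = [frames[0]]
--
--     for i in range(1, len(frames)):
--         gap = frames[i] - frames[i - 1]
--
--         if gap <= max_gap:
--             # 帧间隔在阈值内，属于同一绑定段
--             current_segment.append(frames[i])
--         else:
--             # 帧间隔超过阈值，开始新的绑定段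
--             if len(current_segment) > 1:  # 只保存有持续时间的段
--                 segments.append(current_segment)
--             current_segment = [frames[i]]
--
--     # 添加最后一个段
--     if len(current_segment) > 1:
--         segments.append(current_segment)
--
--     return segments
-- ===== SOURCE B (Python) =====
-- def _find_continuous_binding_segments(frames, copter_id, max_gap):
--     # Two-phase decomposition: recursively split off maximal continuous runs,
--     # then filter out singleton runs at the end.
--     runs = []
--     rest = frames
--     while rest:
--         k = 1
--         while k < len(rest) and rest[k] - rest[k - 1] <= max_gap:
--             k += 1
--         runs.append(rest[:k])
--         rest = rest[k:]
--     return [run for run in runs if len(run) > 1]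
-- ===== Notes on version B (the rewrite author's own statement) =====
-- stated objective: alternative
-- what changed: B splits the frame list into ALL maximal continuous runs first (repeatedly scanning off the longest gap-bounded prefix) and filters singleton runs in a separate final pass, instead of A's single accumulator loop that interleaves segment growth with conditional emission.
import Mathlib
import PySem

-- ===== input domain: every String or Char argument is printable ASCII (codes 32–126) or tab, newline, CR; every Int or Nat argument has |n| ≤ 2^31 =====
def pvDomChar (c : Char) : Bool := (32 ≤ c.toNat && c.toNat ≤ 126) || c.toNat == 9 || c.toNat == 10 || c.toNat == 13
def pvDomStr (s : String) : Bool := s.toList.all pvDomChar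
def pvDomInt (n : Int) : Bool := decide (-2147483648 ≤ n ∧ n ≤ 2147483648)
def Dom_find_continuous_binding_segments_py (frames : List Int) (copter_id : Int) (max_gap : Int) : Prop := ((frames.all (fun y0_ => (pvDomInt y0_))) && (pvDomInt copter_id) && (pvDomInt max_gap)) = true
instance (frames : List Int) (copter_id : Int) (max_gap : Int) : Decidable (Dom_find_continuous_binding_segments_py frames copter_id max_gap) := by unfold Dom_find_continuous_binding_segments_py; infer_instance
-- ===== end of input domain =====

-- B splits the list into all maximal continuous runs first and filters singleton
-- runs afterwards (two-phase), instead of A's accumulator loop; objective: alternative.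


-- ===== PORT A =====
-- A's for-loop over i in range(1, len(frames)): tail recursion over the remaining
-- frames, carrying frames[i-1] as `prev` and the state (segments, current_segment).
def goA (mg : Int) (segments : List (List Int)) (current : List Int) (prev : Int) : List Int → List (List Int)
  | [] => if current.length > 1 then segments ++ [current] else segments
  | x :: rest =>
    if x - prev ≤ mg then goA mg segments (current ++ [x]) x rest
    else goA mg (if current.length > 1 then segments ++ [current] else segments) [x] x rest

def find_continuous_binding_segments_py (frames : List Int) (copter_id : Int) (max_gap : Int) : List (List Int) :=
  match frames with
  | [] => []
  | f :: rest => goA max_gap [] [f] f rest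

-- ===== PORT B =====
-- B's inner while loop: scan off the maximal gap-bounded run prefix, returning
-- (run after the first element, remaining frames).
def spanRun (mg : Int) (prev : Int) : List Int → List Int × List Int
  | [] => ([], [])
  | x :: xs =>
    if x - prev ≤ mg then
      let p := spanRun mg x xs
      (x :: p.1, p.2)
    else ([], x :: xs)

theorem spanRun_snd_length (mg prev : Int) (xs : List Int) : (spanRun mg prev xs).2.length ≤ xs.length := by
  induction xs generalizing prev with
  | nil => simp [spanRun]
  | cons x xs ih =>
    simp only [spanRun]
    split
    · exact Nat.le_succ_of_le (ih x)
    · simp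

-- B's outer while loop: collect all maximal runs.
def splitRuns (mg : Int) : List Int → List (List Int)
  | [] => []
  | f :: rest =>
    let p := spanRun mg f rest
    (f :: p.1) :: splitRuns mg p.2
termination_by l => l.length
decreasing_by
  have := spanRun_snd_length mg f rest
  simpa using Nat.lt_succ_of_le this

def find_continuous_binding_segments_py_alt (frames : List Int) (copter_id : Int) (max_gap : Int) : List (List Int) :=
  (splitRuns max_gap frames).filter (fun run => run.length > 1)

-- ===== PRECONDITION & SPEC =====
def Spec_find_continuous_binding_segments_py (frames : List Int) (copter_id : Int) (max_gap : Int) (out : List (List Int)) : Prop := out = find_continuous_binding_segments_py_alt frames copter_id max_gap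
instance (frames : List Int) (copter_id : Int) (max_gap : Int) (out : List (List Int)) : Decidable (Spec_find_continuous_binding_segments_py frames copter_id max_gap out) := by unfold Spec_find_continuous_binding_segments_py; infer_instance

-- ===== CLAIM (what is proved, stated in full; the proofs are below) =====
def Claim_equal_find_continuous_binding_segments_py : Prop := ∀ (frames : List Int) (copter_id : Int) (max_gap : Int), Dom_find_continuous_binding_segments_py frames copter_id max_gap → Spec_find_continuous_binding_segments_py frames copter_id max_gap (find_continuous_binding_segments_py frames copter_id max_gap)

-- ===== LEMMAS AND PROOFS =====

-- All runs produced by A's loop, before singleton filtering.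
def collect (mg : Int) (cur : List Int) (prev : Int) : List Int → List (List Int)
  | [] => [cur]
  | x :: xs => if x - prev ≤ mg then collect mg (cur ++ [x]) x xs else cur :: collect mg [x] x xs

theorem goA_eq_collect (mg : Int) (rest : List Int) :
    ∀ (segs : List (List Int)) (cur : List Int) (prev : Int),
      goA mg segs cur prev rest = segs ++ (collect mg cur prev rest).filter (fun r => r.length > 1) := by
  induction rest with
  | nil =>
    intro segs cur prev
    simp only [goA, collect, List.filter]
    split_ifs with h
    · simp [h]
    · simp [h]
  | cons x xs ih =>
    intro segs cur prev
    simp only [goA, collect]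
    split_ifs with h hl
    · exact ih segs (cur ++ [x]) x
    · rw [ih (segs ++ [cur]) [x] x]
      simp [hl]
    · rw [ih segs [x] x]
      simp [hl]

theorem collect_eq_splitRuns (mg : Int) (rest : List Int) :
    ∀ (cur : List Int) (prev : Int),
      collect mg cur prev rest = (cur ++ (spanRun mg prev rest).1) :: splitRuns mg (spanRun mg prev rest).2 := by
  induction rest with
  | nil => intro cur prev; simp [collect, spanRun, splitRuns]
  | cons x xs ih =>
    intro cur prev
    simp only [collect, spanRun]
    split_ifs with h
    · rw [ih (cur ++ [x]) x]; simp
    · rw [ih [x] x, splitRuns]; simp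

-- ===== VERDICT (by name: the statement is the Claim_ definition above) =====
theorem find_continuous_binding_segments_py_spec : Claim_equal_find_continuous_binding_segments_py := by
  intro frames copter_id max_gap _
  unfold Spec_find_continuous_binding_segments_py
  cases frames with
  | nil => simp [find_continuous_binding_segments_py, find_continuous_binding_segments_py_alt, splitRuns]
  | cons f rest =>
    show goA max_gap [] [f] f rest = _
    rw [goA_eq_collect, collect_eq_splitRuns]
    unfold find_continuous_binding_segments_py_alt
    rw [splitRuns]
    simp
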